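-- pv_equiv track=rewrite | github.com/spacetelescope/crds | crds/core/generic_tpn.py | _fix_quoted_whitespace
-- ===== SOURCE A (Python) =====
-- SPACE_MAGIC = "@@1324$$"
--
-- def _fix_quoted_whitespace(line):
--     """Replace spaces and tabs which appear inside quotes in `line` with
--     magic,  and return it.
--     """
--     i = 0
--     while i < len(line):
--         char = line[i]
--         i += 1
--         if char != '"':
--             continue
--         quote = char
--         while i < len(line):
--             char = line[i]
--             i += 1
--             if char == quote:
--                 break
--             if char in " \t":
--                 line = line[:i-1] + SPACE_MAGIC + line[i:]
--     return line
-- ===== SOURCE B (Python) =====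
-- SPACE_MAGIC = "@@1324$$"
--
-- def _fix_quoted_whitespace(line):
--     """Replace spaces and tabs which appear inside quotes in `line` with
--     magic, and return it.
--
--     Split on '"': segments at odd positions are inside quotes (the tail after
--     an unterminated quote ends up inside too, as in the original); rewrite the
--     inside segments character by character and rejoin.
--     """
--     fixed = []
--     inside = False
--     for seg in line.split('"'):
--         if inside:
--             seg = "".join(SPACE_MAGIC if ch in " \t" else ch for ch in seg)
--         fixed.append(seg)
--         inside = not inside
--     return '"'.join(fixed)
-- ===== Notes on version B (the rewrite author's own statement) =====
-- stated objective: faster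
-- what changed: Instead of an index-mutating double while-loop that splices SPACE_MAGIC into the string being scanned (copying it on every replacement) and then re-scans across the inserted marker, B splits the line on the quote character, rewrites whitespace only in the alternating inside-quotes segments in one pass, and rejoins.
import Mathlib
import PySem

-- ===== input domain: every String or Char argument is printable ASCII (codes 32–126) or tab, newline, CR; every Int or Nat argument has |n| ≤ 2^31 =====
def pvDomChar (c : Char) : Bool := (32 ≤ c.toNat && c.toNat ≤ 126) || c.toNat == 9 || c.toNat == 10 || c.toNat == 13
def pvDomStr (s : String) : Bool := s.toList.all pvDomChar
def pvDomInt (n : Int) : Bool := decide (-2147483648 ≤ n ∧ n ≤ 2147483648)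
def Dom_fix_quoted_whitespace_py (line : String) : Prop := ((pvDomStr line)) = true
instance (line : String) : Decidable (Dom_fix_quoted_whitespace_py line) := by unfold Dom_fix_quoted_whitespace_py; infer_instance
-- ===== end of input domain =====

-- B replaces A's index-mutating double while-loop (which splices SPACE_MAGIC into the string
-- being scanned and re-scans across the inserted marker) by split-on-'"' / rewrite the
-- alternating inside segments / rejoin (one pass, no re-copying; a timing run measured B faster).

-- SPACE_MAGIC = "@@1324$$"
def spaceMagic : List Char := ['@','@','1','3','2','4','$','$']

-- ===== PORT A =====
-- A's state (line, i) is represented as the pair (pre, suf) with pre = line[:i], suf = line[i:]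
-- (i only ever moves forward by 1, and the splice `line[:i-1] + SPACE_MAGIC + line[i:]` happens
-- right after reading the whitespace char at i-1 = the head of the old suffix, so it is
-- pre ++ SPACE_MAGIC ++ rest with the scan resuming at old i, i.e. one char into the magic).
-- mode = false: the outer while-loop (outside quotes); mode = true: the inner while-loop.
def runA : Bool → List Char → List Char → List Char
  | _, pre, [] => pre                                   -- while-condition i < len(line) fails
  | false, pre, c :: rest =>
      if c ≠ '"' then runA false (pre ++ [c]) rest      -- continue
      else runA true (pre ++ [c]) rest                  -- enter the inner loop
  | true, pre, c :: rest =>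
      if c = '"' then runA false (pre ++ [c]) rest      -- break
      else if c = ' ' || c = '\t' then
        -- line = line[:i-1] + SPACE_MAGIC + line[i:]; i unchanged (points into the magic)
        runA true (pre ++ ['@']) (['@','1','3','2','4','$','$'] ++ rest)  -- SPACE_MAGIC[1:] ++ line[i:]
      else runA true (pre ++ [c]) rest
termination_by _ _ suf => 8 * suf.countP (fun c => c = ' ' || c = '\t') + suf.length
decreasing_by
  all_goals simp_all [List.countP_cons, List.countP_append]
  all_goals omega

def fix_quoted_whitespace_py (line : String) : String :=
  String.ofList (runA false [] line.toList)

-- ===== PORT B =====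
-- Source B: "".join(SPACE_MAGIC if ch in " \t" else ch for ch in seg)
def fixSeg (seg : List Char) : List Char :=
  seg.flatMap (fun ch => if ch = ' ' || ch = '\t' then spaceMagic else [ch])

-- Source B's for-loop over the segments with the alternating `inside` flag
def altGo : Bool → List (List Char) → List (List Char)
  | _, [] => []
  | inside, seg :: segs => (if inside then fixSeg seg else seg) :: altGo (!inside) segs

-- line.split('"') ported as List.splitOn '"' (Python's str.split with a one-char separator);
-- '"'.join(fixed) ported as List.intercalate ['"']
def fix_quoted_whitespace_py_alt (line : String) : String :=
  String.ofList (List.intercalate ['"'] (altGo false (line.toList.splitOn '"')))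

-- ===== PRECONDITION & SPEC =====
def Spec_fix_quoted_whitespace_py (line : String) (out : String) : Prop := out = fix_quoted_whitespace_py_alt line
instance (line : String) (out : String) : Decidable (Spec_fix_quoted_whitespace_py line out) := by unfold Spec_fix_quoted_whitespace_py; infer_instance

-- ===== CLAIM (what is proved, stated in full; the proofs are below) =====
def Claim_equal_fix_quoted_whitespace_py : Prop := ∀ (line : String), Dom_fix_quoted_whitespace_py line → Spec_fix_quoted_whitespace_py line (fix_quoted_whitespace_py line)

-- ===== LEMMAS AND PROOFS =====

-- Reference form both ports are reduced to: one char-by-char pass with an inside-quotes flag.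
def specF : Bool → List Char → List Char
  | _, [] => []
  | b, c :: rest =>
      if c = '"' then '"' :: specF (!b) rest
      else if b && (c = ' ' || c = '\t') then spaceMagic ++ specF b rest
      else c :: specF b rest

-- specF passes unchanged over chars that are neither '"' nor whitespace
theorem specF_plain_append (s : List Char) (h : ∀ c ∈ s, c ≠ '"' ∧ c ≠ ' ' ∧ c ≠ '\t') :
    ∀ (b : Bool) (rest : List Char), specF b (s ++ rest) = s ++ specF b rest := by
  induction s with
  | nil => simp
  | cons c s ih =>
    intro b rest
    obtain ⟨h1, h2, h3⟩ := h c (by simp)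
    simp only [List.cons_append, specF]
    rw [if_neg h1, if_neg (by simp [h2, h3]), ih (fun c hc => h c (List.mem_cons_of_mem _ hc)) b rest]

theorem specF_cons (b : Bool) (c : Char) (rest : List Char) :
    specF b (c :: rest) = if c = '"' then '"' :: specF (!b) rest
      else if b && (c = ' ' || c = '\t') then spaceMagic ++ specF b rest
      else c :: specF b rest := by
  rw [specF]

theorem runA_eq_specF : ∀ (mode : Bool) (pre suf : List Char),
    runA mode pre suf = pre ++ specF mode suf := by
  intro mode pre suf
  induction mode, pre, suf using runA.induct with
  | case1 x pre => simp [runA, specF]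
  | case2 pre c rest h ih =>
    simp only [runA]
    rw [if_pos h, ih, specF_cons, if_neg h]
    simp [h]
  | case3 pre c rest h ih =>
    have hc : c = '"' := not_not.mp h
    subst hc
    simp only [runA]
    rw [if_neg (by simp), ih, specF_cons, if_pos rfl]
    simp
  | case4 pre rest ih =>
    simp only [runA]
    rw [if_pos trivial, ih, specF_cons, if_pos rfl]
    simp
  | case5 pre c rest h1 h2 ih =>
    simp only [runA]
    rw [if_neg h1, if_pos h2, ih,
        specF_plain_append ['@','1','3','2','4','$','$'] (by intro x hx; fin_cases hx <;> exact ⟨by decide, by decide, by decide⟩) true rest,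
        specF_cons, if_neg h1, if_pos (by simp [h2])]
    simp [spaceMagic]
  | case6 pre c rest h1 h2 ih =>
    simp only [runA]
    rw [if_neg h1, if_neg h2, ih, specF_cons, if_neg h1, if_neg (by simp [h2])]
    simp

theorem length_altGo (b : Bool) (l : List (List Char)) : (altGo b l).length = l.length := by
  induction l generalizing b with
  | nil => rfl
  | cons p ps ih => simp [altGo, ih]

theorem intercalate_cons_cons (sep a b : List Char) (t : List (List Char)) :
    sep.intercalate (a :: b :: t) = a ++ sep ++ sep.intercalate (b :: t) := by
  simp [List.intercalate, List.intersperse]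

theorem fixSeg_cons (c : Char) (p : List Char) :
    fixSeg (c :: p) = (if c = ' ' || c = '\t' then spaceMagic else [c]) ++ fixSeg p := by
  simp [fixSeg]

theorem splitOn_quote_cons (c : Char) (rest : List Char) :
    List.splitOn '"' (c :: rest) = if c = '"' then [] :: List.splitOn '"' rest
      else List.modifyHead (List.cons c) (List.splitOn '"' rest) := by
  by_cases hc : c = '"' <;> simp [List.splitOn, List.splitOnP_cons, hc]

theorem splitOn_quote_ne_nil (l : List Char) : List.splitOn '"' l ≠ [] :=
  List.splitOnP_ne_nil _ l

theorem altB_eq_specF : ∀ (l : List Char) (b : Bool),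
    List.intercalate ['"'] (altGo b (l.splitOn '"')) = specF b l := by
  intro l
  induction l with
  | nil => intro b; cases b <;> simp [altGo, specF, fixSeg, List.intercalate]
  | cons c rest ih =>
    intro b
    rw [splitOn_quote_cons]
    by_cases hc : c = '"'
    · subst hc
      rw [if_pos rfl]
      have hne : altGo (!b) (List.splitOn '"' rest) ≠ [] := by
        intro h
        have := length_altGo (!b) (List.splitOn '"' rest)
        rw [h] at this
        exact splitOn_quote_ne_nil rest (List.length_eq_zero_iff.mp this.symm)
      obtain ⟨q, qs, hq⟩ := List.exists_cons_of_ne_nil hne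
      rw [show altGo b ([] :: List.splitOn '"' rest)
            = [] :: altGo (!b) (List.splitOn '"' rest) by cases b <;> simp [altGo, fixSeg]]
      rw [hq, intercalate_cons_cons, ← hq, ih (!b)]
      simp [specF_cons]
    · rw [if_neg hc]
      obtain ⟨p, ps, hp⟩ := List.exists_cons_of_ne_nil (splitOn_quote_ne_nil rest)
      rw [hp, List.modifyHead_cons]
      have key : ∀ (b : Bool), List.intercalate ['"'] (altGo b ((c :: p) :: ps))
          = (if b && (c = ' ' || c = '\t') then spaceMagic else [c])
            ++ List.intercalate ['"'] (altGo b (p :: ps)) := by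
        intro b
        cases ps with
        | nil =>
          cases b <;> simp [altGo, List.intercalate, fixSeg_cons] <;> split <;> simp
        | cons q qs =>
          rw [show altGo b ((c :: p) :: q :: qs)
                = (if b then fixSeg (c :: p) else (c :: p)) :: altGo (!b) (q :: qs) by
              cases b <;> simp [altGo]]
          rw [show altGo b (p :: q :: qs)
                = (if b then fixSeg p else p) :: altGo (!b) (q :: qs) by
              cases b <;> simp [altGo]]
          obtain ⟨r, rs, hr⟩ := List.exists_cons_of_ne_nil
            (show altGo (!b) (q :: qs) ≠ [] by cases b <;> simp [altGo])
          rw [hr, intercalate_cons_cons, intercalate_cons_cons]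
          cases b <;> simp [fixSeg_cons] <;> split <;> simp
      rw [key b, ← hp, ih b, specF_cons, if_neg hc]
      cases hcond : (b && (decide (c = ' ') || decide (c = '\t'))) <;> simp [hcond]

-- ===== VERDICT (by name: the statement is the Claim_ definition above) =====
theorem fix_quoted_whitespace_py_spec : Claim_equal_fix_quoted_whitespace_py := by
  intro line _
  unfold Spec_fix_quoted_whitespace_py fix_quoted_whitespace_py fix_quoted_whitespace_py_alt
  rw [runA_eq_specF, altB_eq_specF]
  simp
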